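-- pv_equiv track=rewrite | github.com/ghamlet/Informatics-EGE-2024-25 | 26_/1.py | check_tasks
-- ===== SOURCE A (Python) =====
-- def check_tasks(tasks:list):
--     mx_count = 1
--
--     tasks = sorted(set(tasks))
--
--     for i in range(len(tasks)-1):
--         if tasks[i+1] - tasks[i] ==1:
--             mx_count+=1
--         else:
--             mx_count = 1
--
--     return mx_count
-- ===== SOURCE B (Python) =====
-- def check_tasks(tasks: list):
--     # Hash-set walk: descend from the maximum counting consecutive members (no sorting).
--     s = set(tasks)
--     if not s:
--         return 1
--     m = max(s)
--     k = 1
--     for _ in range(len(s)):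
--         if m - k in s:
--             k += 1
--         else:
--             break
--     return k
-- ===== Notes on version B (the rewrite author's own statement) =====
-- stated objective: faster
-- what changed: A sorts the deduplicated values and scans adjacent gaps with a reset counter; B builds a hash set and walks down from the maximum counting consecutive members, with no sorting.
import Mathlib
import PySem

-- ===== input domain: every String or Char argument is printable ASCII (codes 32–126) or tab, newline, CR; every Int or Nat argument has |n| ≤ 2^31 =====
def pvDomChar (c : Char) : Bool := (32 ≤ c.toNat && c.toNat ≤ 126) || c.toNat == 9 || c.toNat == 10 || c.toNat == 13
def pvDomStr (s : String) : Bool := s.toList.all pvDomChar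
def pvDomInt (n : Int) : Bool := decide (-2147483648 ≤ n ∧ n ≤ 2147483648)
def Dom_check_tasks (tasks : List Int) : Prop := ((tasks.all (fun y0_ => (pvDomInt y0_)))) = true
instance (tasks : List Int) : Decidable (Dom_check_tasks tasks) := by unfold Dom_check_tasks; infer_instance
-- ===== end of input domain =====

-- B replaces A's sort-then-scan by a hash-set walk descending from the maximum (no sorting); objective: faster.


-- ===== PORT A =====
-- tasks = sorted(set(tasks)); for i in range(len(tasks)-1): mx_count = mx_count+1 if gap==1 else 1
def check_tasks (tasks : List Int) : Int :=
  let ts := PySem.List.sorted (PySem.Set.ofList tasks) (fun x => x) false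
  (PySem.List.pyRange 0 ((ts.length : Int) - 1) 1).foldl
    (fun mx_count i =>
      if PySem.List.pyGetD ts (i + 1) 0 - PySem.List.pyGetD ts i 0 = 1 then mx_count + 1 else 1)
    1

-- ===== PORT B =====
-- the bounded descent loop of Source B: 'for _ in range(len(s)): if m - k in s: k += 1 else: break'
def bLoop (s : List Int) (m : Int) : Nat → Int → Int
  | 0, k => k
  | n + 1, k => if s.contains (m - k) then bLoop s m n (k + 1) else k

def check_tasks_alt (tasks : List Int) : Int :=
  let s : PySem.Set Int := PySem.Set.ofList tasks
  if s.isEmpty then 1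
  else
    match PySem.List.max? s (fun x => x) with
    | none => 1
    | some m => bLoop s m s.length 1

-- ===== PRECONDITION & SPEC =====
def Spec_check_tasks (tasks : List Int) (out : Int) : Prop := out = check_tasks_alt tasks
instance (tasks : List Int) (out : Int) : Decidable (Spec_check_tasks tasks out) := by unfold Spec_check_tasks; infer_instance

-- ===== CLAIM (what is proved, stated in full; the proofs are below) =====
def Claim_equal_check_tasks : Prop := ∀ (tasks : List Int), Dom_check_tasks tasks → Spec_check_tasks tasks (check_tasks tasks)

-- ===== LEMMAS AND PROOFS =====

-- A's index loop over a fixed list, as a reusable function of the list (same fold as in the port)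
def afold (ts : List Int) (c : Int) : Int :=
  (PySem.List.pyRange 0 ((ts.length : Int) - 1) 1).foldl
    (fun mx_count i =>
      if PySem.List.pyGetD ts (i + 1) 0 - PySem.List.pyGetD ts i 0 = 1 then mx_count + 1 else 1)
    c

lemma afold_singleton (b c : Int) : afold [b] c = c := rfl

-- peeling the last element off A's scan
lemma afold_concat (M : List Int) (x b c : Int) :
    afold (M ++ [x] ++ [b]) c = if b - x = 1 then afold (M ++ [x]) c + 1 else 1 := by
  have hlen : ((M ++ [x] ++ [b]).length : Int) - 1 = (M.length : Int) + 1 := by simp; ring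
  have hlen2 : ((M ++ [x]).length : Int) - 1 = (M.length : Int) := by simp
  unfold afold
  rw [hlen, hlen2, PySem.List.pyRange_one_succ_right (by positivity), List.foldl_append]
  have hinner :
      (PySem.List.pyRange 0 (M.length : Int)).foldl
        (fun mx_count i =>
          if PySem.List.pyGetD (M ++ [x] ++ [b]) (i + 1) 0 - PySem.List.pyGetD (M ++ [x] ++ [b]) i 0 = 1
          then mx_count + 1 else 1) c
      = (PySem.List.pyRange 0 (M.length : Int)).foldl
        (fun mx_count i =>
          if PySem.List.pyGetD (M ++ [x]) (i + 1) 0 - PySem.List.pyGetD (M ++ [x]) i 0 = 1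
          then mx_count + 1 else 1) c := by
    apply PySem.List.foldl_congr_mem
    intro acc i hi
    have hi' := PySem.List.mem_pyRange_one.mp hi
    have e1 : PySem.List.pyGetD (M ++ [x] ++ [b]) i 0 = PySem.List.pyGetD (M ++ [x]) i 0 := by
      rw [PySem.List.pyGetD_eq_getElem _ _ hi'.1 (by simp only [List.length_append, List.length_cons, List.length_nil]; push_cast; omega),
          PySem.List.pyGetD_eq_getElem _ _ hi'.1 (by simp only [List.length_append, List.length_cons, List.length_nil]; push_cast; omega)]
      rw [List.getElem_append_left (by simp only [List.length_append, List.length_cons, List.length_nil]; push_cast; omega)]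
    have e2 : PySem.List.pyGetD (M ++ [x] ++ [b]) (i + 1) 0 = PySem.List.pyGetD (M ++ [x]) (i + 1) 0 := by
      rw [PySem.List.pyGetD_eq_getElem _ _ (by omega) (by simp only [List.length_append, List.length_cons, List.length_nil]; push_cast; omega),
          PySem.List.pyGetD_eq_getElem _ _ (by omega) (by simp only [List.length_append, List.length_cons, List.length_nil]; push_cast; omega)]
      rw [List.getElem_append_left (by simp only [List.length_append, List.length_cons, List.length_nil]; push_cast; omega)]
    rw [e1, e2]
  rw [hinner]
  have eb : PySem.List.pyGetD (M ++ [x] ++ [b]) ((M.length : Int) + 1) 0 = b := by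
    rw [PySem.List.pyGetD_eq_getElem _ _ (by positivity) (by simp only [List.length_append, List.length_cons, List.length_nil]; push_cast; omega)]
    have : ((M.length : Int) + 1).toNat = (M ++ [x]).length := by simp only [List.length_append, List.length_cons, List.length_nil]; push_cast; omega
    simp only [this, List.getElem_concat_length]
  have ex : PySem.List.pyGetD (M ++ [x] ++ [b]) ((M.length : Int)) 0 = x := by
    rw [PySem.List.pyGetD_eq_getElem _ _ (by positivity) (by simp only [List.length_append, List.length_cons, List.length_nil]; push_cast; omega)]
    have h1 : ((M.length : Int)).toNat = M.length := by omega
    rw [List.getElem_append_left (by simp [h1])]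
    simp only [h1, List.getElem_concat_length]
  simp only [List.foldl_cons, List.foldl_nil, eb, ex]

-- B's loop only looks at membership
lemma bLoop_congr (s t : List Int) (m : Int)
    (h : ∀ z : Int, z ∈ s ↔ z ∈ t) : ∀ (n : Nat) (k : Int), bLoop s m n k = bLoop t m n k := by
  intro n
  induction n with
  | zero => intro k; rfl
  | succ n ih =>
    intro k
    simp only [bLoop]
    have : s.contains (m - k) = t.contains (m - k) := by
      simp [h]
    rw [this]
    split <;> simp [ih]

-- shift: one consecutive step down from b = x+1 turns the walk on M ++ [b] into the walk on M
lemma bLoop_shift (M : List Int) (x b : Int) (hb : b = x + 1) :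
    ∀ (n : Nat) (k : Int), 1 ≤ k → bLoop (M ++ [b]) b n (k + 1) = bLoop M x n k + 1 := by
  intro n
  induction n with
  | zero => intro k _; rfl
  | succ n ih =>
    intro k hk
    simp only [bLoop]
    have hmem : (M ++ [b]).contains (b - (k + 1)) = M.contains (x - k) := by
      have h1 : b - (k + 1) = x - k := by omega
      have h2 : (x - k ∈ M ++ [b]) ↔ x - k ∈ M := by
        simp only [List.mem_append, List.mem_singleton]
        constructor
        · rintro (h | h)
          · exact h
          · omega
        · exact Or.inl
      simp [h1, h2]
    rw [hmem]
    split
    · exact ih (k + 1) (by omega)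
    · rfl

-- the last element of a <-sorted nonempty list is its maximum
lemma concat_max (M : List Int) (x : Int) (hp : (M ++ [x]).Pairwise (· < ·)) :
    ∀ y ∈ M ++ [x], y ≤ x := by
  intro y hy
  rcases List.mem_append.mp hy with h | h
  · have := (List.pairwise_append.mp hp).2.2 y h x (List.mem_singleton_self x)
    omega
  · simp at h; omega

-- main induction: on a strictly increasing list with maximum m, A's scan equals B's descent
lemma main_lemma : ∀ (L : List Int), L.Pairwise (· < ·) → ∀ m : Int, m ∈ L →
    (∀ y ∈ L, y ≤ m) → afold L 1 = bLoop L m L.length 1 := by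
  intro L
  induction L using List.reverseRecOn with
  | nil => intro _ m hm; exact absurd hm (by simp)
  | append_singleton M b ih =>
    intro hp m hm hmax
    -- b is the maximum m
    have hltb : ∀ y ∈ M, y < b := fun y hy =>
      (List.pairwise_append.mp hp).2.2 y hy b (List.mem_singleton_self b)
    have hmb : m = b := by
      have hb : b ≤ m := hmax b (by simp)
      rcases List.mem_append.mp hm with h | h
      · exact absurd (hltb m h) (by omega)
      · simp at h; omega
    subst hmb
    rcases List.eq_nil_or_concat M with hM | ⟨M', x, hM⟩
    · subst hM
      simp only [List.nil_append, afold_singleton, List.length_singleton, bLoop]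
      simp
    · rw [List.concat_eq_append] at hM
      subst hM
      have hpM : (M' ++ [x]).Pairwise (· < ·) := (List.pairwise_append.mp hp).1
      have hxm : x < m := hltb x (by simp)
      have hmaxM : ∀ y ∈ M' ++ [x], y ≤ x := concat_max M' x hpM
      rw [afold_concat]
      by_cases hc : m - x = 1
      · -- consecutive: first membership test succeeds, then shift
        have hstep : bLoop (M' ++ [x] ++ [m]) m ((M' ++ [x] ++ [m]).length) 1
            = bLoop (M' ++ [x]) x ((M' ++ [x]).length) 1 + 1 := by
          have hlen : (M' ++ [x] ++ [m]).length = (M' ++ [x]).length + 1 := by simp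
          rw [hlen]
          simp only [bLoop]
          have hmem : (M' ++ [x] ++ [m]).contains (m - 1) = true := by
            have hx1 : m - 1 = x := by omega
            simp [hx1]
          rw [hmem]
          simp only [if_true]
          exact bLoop_shift (M' ++ [x]) x m (by omega) ((M' ++ [x]).length) 1 le_rfl
        rw [hstep, if_pos hc, ih hpM x (by simp) hmaxM]
      · -- gap: first membership test fails, both sides are 1
        rw [if_neg hc]
        have hlen : (M' ++ [x] ++ [m]).length = (M' ++ [x]).length + 1 := by simp
        rw [hlen]
        simp only [bLoop]
        have hmem : (M' ++ [x] ++ [m]).contains (m - 1) = false := by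
          simp only [List.contains_eq_mem, List.mem_append, List.mem_singleton,
            decide_eq_false_iff_not]
          push Not
          refine ⟨⟨fun h => ?_, fun h => ?_⟩, by omega⟩
          · have h1 := hmaxM (m - 1) (List.mem_append.mpr (Or.inl h)); omega
          · have h1 := hmaxM (m - 1) (List.mem_append.mpr (Or.inr (by simp [h]))); omega
        rw [hmem]
        rfl

-- ===== VERDICT (by name: the statement is the Claim_ definition above) =====
theorem check_tasks_spec : Claim_equal_check_tasks := by
  intro tasks _
  unfold Spec_check_tasks check_tasks_alt
  by_cases hnil : tasks = []
  · subst hnil; rfl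
  · have hs : (PySem.Set.ofList tasks : List Int) ≠ [] := by
      intro h
      have := (PySem.Set.mem_ofList tasks (tasks.head hnil)).mpr (List.head_mem hnil)
      simp [h] at this
    obtain ⟨m, hmx⟩ : ∃ m, PySem.List.max? (PySem.Set.ofList tasks) (fun x => x) = some m := by
      cases hx : PySem.List.max? (PySem.Set.ofList tasks) (fun x => x) with
      | none => exact absurd ((PySem.List.max?_eq_none_iff _ _).mp hx) hs
      | some m => exact ⟨m, rfl⟩
    simp only [List.isEmpty_iff, hs, if_false, hmx]
    set s : List Int := PySem.Set.ofList tasks with hsdef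
    set L : List Int := PySem.List.sorted s (fun x => x) false with hLdef
    have hperm : L.Perm s := PySem.List.sorted_perm s (fun x => x) false
    have hmemiff : ∀ z : Int, z ∈ s ↔ z ∈ L := fun z => (PySem.List.mem_sorted s _ false z).symm
    have hlen : s.length = L.length := (hperm.length_eq).symm
    have hA : check_tasks tasks = afold L 1 := rfl
    rw [hA, bLoop_congr s L m hmemiff s.length 1, hlen]
    have hpair : L.Pairwise (· < ·) := by
      have h1 := PySem.List.sorted_pairwise s (fun x => x)
      have h2 : L.Nodup := hperm.nodup_iff.mpr (PySem.Set.nodup_ofList tasks)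
      exact (h1.and h2).imp (fun hab => lt_of_le_of_ne hab.1 hab.2)
    exact main_lemma L hpair m ((hmemiff m).mp (PySem.List.max?_mem hmx))
      (fun y hy => PySem.List.max?_isMax hmx y ((hmemiff y).mpr hy))
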